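-- pv_equiv track=rewrite | github.com/DOI-USGS/gems-tools-pro | Scripts/GeMS_ValidateDatabase_AGP2.py | matchRefs
-- ===== SOURCE A (Python) =====
-- def removeDuplicates(alist):
--     nodupList = []
--     for i in alist:
--         if not i in nodupList:
--             nodupList.append(i)
--     return nodupList
--
-- def matchRefs(definedVals, allRefs):
--     # for references to/from Glossary and DataSources
--     # allrefs are [value, field, table]
--     used = removeDuplicates(allRefs)
--     usedVals = []
--     unused = []
--     missing = []
--     plainUnused = []
--     for i in used:
--         ### problem here with values in Unicode. Not sure solution will be generally valid
--         # if not i[0].encode("ascii",'xmlcharrefreplace') in definedVals and not i[0] in usedVals: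
--         if not i[0] in definedVals and not i[0] in usedVals:
--             missing.append(
--                 '<span class="value">'
--                 + str(i[0])
--                 + '</span>, field <span class="field">'
--                 + i[1]
--                 + '</span>, table <span class="table">'
--                 + i[2]
--                 + "</span>"
--             )
--         usedVals.append(i[0])
--     missing.sort()
--     for i in definedVals:
--         if not i in usedVals:
--             unused.append('<span class="value">' + str(i) + "</span>")
--             plainUnused.append(i)
--     unused.sort()
--     return unused, missing, plainUnused
-- ===== SOURCE B (Python) =====
-- def matchRefs(definedVals, allRefs):
--     # Worklist algorithm: instead of deduplicating and tracking seen values,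
--     # repeatedly take the first reference and discard every later reference to
--     # the same value, so each value is handled exactly once at its first ref.
--     spans = []
--     work = list(allRefs)
--     while work:
--         value, field, table = work[0]
--         if value not in definedVals:
--             spans.append(
--                 '<span class="value">'
--                 + str(value)
--                 + '</span>, field <span class="field">'
--                 + field
--                 + '</span>, table <span class="table">'
--                 + table
--                 + "</span>"
--             )
--         work = [r for r in work[1:] if r[0] != value]
--     missing = sorted(spans)
--     referenced = {value for value, field, table in allRefs}
--     plainUnused = [v for v in definedVals if v not in referenced]
--     unused = sorted('<span class="value">' + str(v) + "</span>" for v in plainUnused)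
--     return unused, missing, plainUnused
-- ===== Notes on version B (the rewrite author's own statement) =====
-- stated objective: alternative
-- what changed: Replaces A's removeDuplicates pass plus the growing usedVals seen-list with a shrinking-worklist loop (take the first reference, emit it, filter all later references to the same value out of the worklist) and computes unused by filtering definedVals against the set of referenced values.
import Mathlib
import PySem

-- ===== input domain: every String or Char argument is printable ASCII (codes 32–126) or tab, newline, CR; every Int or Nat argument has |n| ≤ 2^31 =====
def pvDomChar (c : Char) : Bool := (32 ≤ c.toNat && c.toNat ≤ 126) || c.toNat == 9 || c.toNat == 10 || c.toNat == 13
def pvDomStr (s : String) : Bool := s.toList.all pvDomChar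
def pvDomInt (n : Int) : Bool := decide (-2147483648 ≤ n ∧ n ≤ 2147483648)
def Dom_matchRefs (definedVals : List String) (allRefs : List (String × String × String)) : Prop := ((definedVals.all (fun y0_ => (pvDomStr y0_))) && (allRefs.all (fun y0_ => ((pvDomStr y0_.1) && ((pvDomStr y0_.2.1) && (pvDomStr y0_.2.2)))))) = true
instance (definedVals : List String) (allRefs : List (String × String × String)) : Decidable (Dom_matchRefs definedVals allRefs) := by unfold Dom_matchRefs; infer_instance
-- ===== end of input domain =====

-- B replaces A's dedup pass + growing seen-list with a shrinking-worklist loop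
-- and a referenced-value set for the unused side (objective: alternative algorithm).

-- shared string-building helpers (the exact HTML concatenations of the Python)
def pvSpanMissing (v f t : String) : String :=
  "<span class=\"value\">" ++ v ++ "</span>, field <span class=\"field\">" ++ f
    ++ "</span>, table <span class=\"table\">" ++ t ++ "</span>"

def pvSpanUnused (v : String) : String :=
  "<span class=\"value\">" ++ v ++ "</span>"

-- ===== PORT A =====
def removeDuplicatesPort (alist : List (String × String × String)) : List (String × String × String) :=
  alist.foldl (fun nodupList i => if i ∈ nodupList then nodupList else nodupList ++ [i]) []

def matchRefs (definedVals : List String) (allRefs : List (String × String × String)) : List String × List String × List String :=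
  let used := removeDuplicatesPort allRefs
  let mu := used.foldl
    (fun (acc : List String × List String) i =>
      ((if i.1 ∉ definedVals ∧ i.1 ∉ acc.2 then acc.1 ++ [pvSpanMissing i.1 i.2.1 i.2.2] else acc.1),
        acc.2 ++ [i.1]))
    ([], [])
  let missing := PySem.List.sorted mu.1 (fun x => x) false
  let usedVals := mu.2
  let up := definedVals.foldl
    (fun (acc : List String × List String) i =>
      if i ∉ usedVals then (acc.1 ++ [pvSpanUnused i], acc.2 ++ [i]) else acc)
    ([], [])
  (PySem.List.sorted up.1 (fun x => x) false, missing, up.2)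

-- ===== PORT B =====
-- the 'while work:' worklist loop of Source B, as structural recursion on the worklist
def pvWorklist (definedVals : List String) : List (String × String × String) → List String
  | [] => []
  | x :: rest =>
    (if x.1 ∈ definedVals then [] else [pvSpanMissing x.1 x.2.1 x.2.2])
      ++ pvWorklist definedVals (rest.filter (fun r => r.1 != x.1))
termination_by work => work.length
decreasing_by
  have h := List.length_filter_le (fun x_1 : {y // y ∈ rest} => x_1.val.1 != x.1) rest.attach
  simp at h ⊢
  omega

def matchRefs_alt (definedVals : List String) (allRefs : List (String × String × String)) : List String × List String × List String :=
  let missing := PySem.List.sorted (pvWorklist definedVals allRefs) (fun x => x) false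
  let referenced : PySem.Set String := PySem.Set.ofList (allRefs.map (·.1))
  let plainUnused := definedVals.filter (fun v => !(PySem.Set.contains referenced v))
  let unused := PySem.List.sorted (plainUnused.map pvSpanUnused) (fun x => x) false
  (unused, missing, plainUnused)

-- ===== PRECONDITION & SPEC =====
def Spec_matchRefs (definedVals : List String) (allRefs : List (String × String × String)) (out : List String × List String × List String) : Prop := out = matchRefs_alt definedVals allRefs
instance (definedVals : List String) (allRefs : List (String × String × String)) (out : List String × List String × List String) : Decidable (Spec_matchRefs definedVals allRefs out) := by unfold Spec_matchRefs; infer_instance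

-- ===== CLAIM (what is proved, stated in full; the proofs are below) =====
def Claim_equal_matchRefs : Prop := ∀ (definedVals : List String) (allRefs : List (String × String × String)), Dom_matchRefs definedVals allRefs → Spec_matchRefs definedVals allRefs (matchRefs definedVals allRefs)

-- ===== LEMMAS AND PROOFS =====

-- keep-first-occurrences of full tuples (reference form of removeDuplicates)
def pvKF : List (String × String × String) → List (String × String × String) → List (String × String × String)
  | [], _ => []
  | x :: r, s => if x ∈ s then pvKF r s else x :: pvKF r (s ++ [x])

-- the missing-list a left-to-right walk with a growing seen-values list produces
def pvMList (dv : List String) : List (String × String × String) → List String → List String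
  | [], _ => []
  | x :: r, u =>
    (if x.1 ∉ dv ∧ x.1 ∉ u then [pvSpanMissing x.1 x.2.1 x.2.2] else []) ++ pvMList dv r (u ++ [x.1])

theorem pvKF_foldl (l : List (String × String × String)) (s : List (String × String × String)) :
    l.foldl (fun nd i => if i ∈ nd then nd else nd ++ [i]) s = s ++ pvKF l s := by
  induction l generalizing s with
  | nil => simp [pvKF]
  | cons x r ih =>
    by_cases hx : x ∈ s <;> simp [pvKF, hx, List.foldl_cons, ih]

theorem pvKF_mem (l : List (String × String × String)) (s : List (String × String × String))
    (x : String × String × String) : x ∈ pvKF l s ↔ x ∈ l ∧ x ∉ s := by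
  induction l generalizing s with
  | nil => simp [pvKF]
  | cons y r ih =>
    by_cases hy : y ∈ s
    · rw [pvKF, if_pos hy, ih]
      constructor
      · rintro ⟨h1, h2⟩; exact ⟨List.mem_cons_of_mem _ h1, h2⟩
      · rintro ⟨h1, h2⟩
        rcases List.mem_cons.mp h1 with rfl | h1
        · exact absurd hy h2
        · exact ⟨h1, h2⟩
    · rw [pvKF, if_neg hy]
      constructor
      · intro h1
        rcases List.mem_cons.mp h1 with rfl | h1
        · exact ⟨List.mem_cons_self, hy⟩
        · obtain ⟨ha, hb⟩ := (ih _).mp h1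
          exact ⟨List.mem_cons_of_mem _ ha, fun hc => hb (List.mem_append_left _ hc)⟩
      · rintro ⟨h1, h2⟩
        rcases List.mem_cons.mp h1 with rfl | h1
        · exact List.mem_cons_self
        · by_cases hxy : x = y
          · exact hxy ▸ List.mem_cons_self
          · refine List.mem_cons_of_mem _ ((ih _).mpr ⟨h1, fun hc => ?_⟩)
            rcases List.mem_append.mp hc with h | h
            · exact h2 h
            · exact hxy (List.mem_singleton.mp h)

theorem pvMList_congr (dv : List String) (t : List (String × String × String))
    (u u' : List String) (h : ∀ v, v ∈ u ↔ v ∈ u') : pvMList dv t u = pvMList dv t u' := by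
  induction t generalizing u u' with
  | nil => rfl
  | cons x r ih =>
    have hx : (x.1 ∉ dv ∧ x.1 ∉ u) ↔ (x.1 ∉ dv ∧ x.1 ∉ u') := by
      constructor
      · rintro ⟨h1, h2⟩; exact ⟨h1, fun hc => h2 ((h x.1).mpr hc)⟩
      · rintro ⟨h1, h2⟩; exact ⟨h1, fun hc => h2 ((h x.1).mp hc)⟩
    simp only [pvMList]
    rw [ih (u ++ [x.1]) (u' ++ [x.1]) (by intro v; simp [h v])]
    congr 1
    by_cases hc : x.1 ∉ dv ∧ x.1 ∉ u
    · rw [if_pos hc, if_pos (hx.mp hc)]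
    · rw [if_neg hc, if_neg (fun hc' => hc (hx.mpr hc'))]

-- A's missing/usedVals loop, characterised
theorem pvLoopA (dv : List String) (t : List (String × String × String))
    (m u : List String) :
    t.foldl
      (fun (acc : List String × List String) i =>
        ((if i.1 ∉ dv ∧ i.1 ∉ acc.2 then acc.1 ++ [pvSpanMissing i.1 i.2.1 i.2.2] else acc.1),
          acc.2 ++ [i.1]))
      (m, u)
    = (m ++ pvMList dv t u, u ++ t.map (·.1)) := by
  induction t generalizing m u with
  | nil => simp [pvMList]
  | cons x r ih =>
    simp only [List.foldl_cons, pvMList, List.map_cons]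
    rw [ih]
    by_cases hc : x.1 ∉ dv ∧ x.1 ∉ u <;> simp [hc]

-- dedup of tuples does not change the produced missing list
theorem pvMList_kf (dv : List String) (l : List (String × String × String))
    (s : List (String × String × String)) (u : List String)
    (hinv : ∀ x ∈ s, x.1 ∈ u) :
    pvMList dv (pvKF l s) u = pvMList dv l u := by
  induction l generalizing s u with
  | nil => rfl
  | cons x r ih =>
    by_cases hx : x ∈ s
    · have hxu : x.1 ∈ u := hinv x hx
      rw [pvKF, if_pos hx, ih s u hinv, pvMList,
        if_neg (by simp [hxu] : ¬(x.1 ∉ dv ∧ x.1 ∉ u)), List.nil_append]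
      exact pvMList_congr dv r u (u ++ [x.1]) (by intro v; by_cases hv : v = x.1 <;> simp [hv, hxu])
    · rw [pvKF, if_neg hx, pvMList, pvMList]
      congr 1
      refine ih (s ++ [x]) (u ++ [x.1]) ?_
      intro y hy
      rcases List.mem_append.mp hy with h | h
      · exact List.mem_append_left _ (hinv y h)
      · rw [List.mem_singleton.mp h]; exact List.mem_append_right _ List.mem_cons_self

-- filtering out a value already in the seen-list does not change pvMList
theorem pvMList_filter (dv : List String) (l : List (String × String × String))
    (u : List String) (v : String) (hv : v ∈ u) :
    pvMList dv (l.filter (fun r => r.1 != v)) u = pvMList dv l u := by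
  induction l generalizing u with
  | nil => rfl
  | cons x r ih =>
    by_cases hx : x.1 = v
    · rw [List.filter_cons, if_neg (by simp [hx]), pvMList,
        if_neg (by simp [hx, hv] : ¬(x.1 ∉ dv ∧ x.1 ∉ u)), List.nil_append]
      calc pvMList dv (r.filter (fun r => r.1 != v)) u = pvMList dv r u := ih u hv
        _ = pvMList dv r (u ++ [x.1]) := pvMList_congr dv r u (u ++ [x.1]) (by
            subst hx
            intro w
            constructor
            · intro h; exact List.mem_append_left _ h
            · intro h
              rcases List.mem_append.mp h with h | h
              · exact h
              · rw [List.mem_singleton.mp h]; exact hv)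
    · rw [List.filter_cons, if_pos (by simp [hx]), pvMList, pvMList]
      congr 1
      exact ih (u ++ [x.1]) (List.mem_append_left _ hv)

-- B's worklist loop produces exactly the seen-list walk's missing list
theorem pvWorklist_eq_aux (dv : List String) (n : Nat) :
    ∀ (l : List (String × String × String)), l.length ≤ n →
    ∀ (u : List String), (∀ y ∈ l, y.1 ∉ u) → pvWorklist dv l = pvMList dv l u := by
  induction n with
  | zero =>
    intro l hl u _
    rw [List.length_eq_zero_iff.mp (Nat.le_zero.mp hl), pvWorklist]
    rfl
  | succ n ih0 =>
    intro l hl u hu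
    match l with
    | [] => rw [pvWorklist]; rfl
    | x :: rest =>
    have ih : ∀ (u : List String), (∀ y ∈ rest.filter (fun r => r.1 != x.1), y.1 ∉ u) →
        pvWorklist dv (rest.filter (fun r => r.1 != x.1)) = pvMList dv (rest.filter (fun r => r.1 != x.1)) u := by
      intro u hu
      exact ih0 _ (le_trans (List.length_filter_le _ _) (by simpa using Nat.le_of_succ_le_succ hl)) u hu
    have hxu : x.1 ∉ u := hu x List.mem_cons_self
    rw [pvWorklist, pvMList]
    congr 1
    · by_cases hd : x.1 ∈ dv <;> simp [hd, hxu]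
    · rw [ih (u ++ [x.1]) ?_, pvMList_filter dv rest (u ++ [x.1]) x.1
        (List.mem_append_right _ List.mem_cons_self)]
      intro y hy
      have hyr : y ∈ rest := List.mem_of_mem_filter hy
      have hyne : y.1 ≠ x.1 := by
        have := List.of_mem_filter hy
        simpa using this
      intro hc
      rcases List.mem_append.mp hc with h | h
      · exact hu y (List.mem_cons_of_mem _ hyr) h
      · exact hyne (List.mem_singleton.mp h)

-- A's unused loop is a filter + map over definedVals
theorem pvLoopUnused (uv : List String) (dv : List String) (a b : List String) :
    dv.foldl
      (fun (acc : List String × List String) i =>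
        if i ∉ uv then (acc.1 ++ [pvSpanUnused i], acc.2 ++ [i]) else acc)
      (a, b)
    = (a ++ (dv.filter (fun i => decide (i ∉ uv))).map pvSpanUnused,
       b ++ dv.filter (fun i => decide (i ∉ uv))) := by
  induction dv generalizing a b with
  | nil => simp
  | cons x r ih =>
    rw [List.foldl_cons, List.filter_cons]
    by_cases hx : x ∉ uv
    · rw [if_pos hx, ih, if_pos (by simpa using hx)]
      simp
    · rw [if_neg hx, ih, if_neg (by simpa using hx)]

-- ===== VERDICT (by name: the statement is the Claim_ definition above) =====
theorem matchRefs_spec : Claim_equal_matchRefs := by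
  intro dv l _
  unfold Spec_matchRefs matchRefs matchRefs_alt removeDuplicatesPort
  have hkf : l.foldl (fun nd i => if i ∈ nd then nd else nd ++ [i]) [] = pvKF l [] := by
    simpa using pvKF_foldl l []
  have hmiss : pvMList dv (pvKF l []) [] = pvMList dv l [] := pvMList_kf dv l [] [] (by simp)
  have hB : pvWorklist dv l = pvMList dv l [] :=
    pvWorklist_eq_aux dv l.length l le_rfl [] (by simp)
  -- the two unused-side membership tests agree
  have hmem : ∀ v : String, v ∈ (pvKF l []).map (·.1) ↔ v ∈ l.map (·.1) := by
    intro v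
    constructor
    · intro h
      rcases List.mem_map.mp h with ⟨x, hx, rfl⟩
      exact List.mem_map.mpr ⟨x, ((pvKF_mem l [] x).mp hx).1, rfl⟩
    · intro h
      rcases List.mem_map.mp h with ⟨x, hx, rfl⟩
      exact List.mem_map.mpr ⟨x, (pvKF_mem l [] x).mpr ⟨hx, by simp⟩, rfl⟩
  have hfilters : dv.filter (fun i => decide (i ∉ (pvKF l []).map (·.1)))
      = dv.filter (fun v => !(PySem.Set.contains (PySem.Set.ofList (l.map (·.1))) v)) := by
    apply List.filter_congr
    intro v _
    by_cases hv : v ∈ l.map (·.1)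
    · have h1 : v ∈ (pvKF l []).map (·.1) := (hmem v).mpr hv
      simp [h1, hv, PySem.Set.mem_ofList]
    · have h1 : v ∉ (pvKF l []).map (·.1) := fun h => hv ((hmem v).mp h)
      simp [h1, hv, PySem.Set.mem_ofList]
  simp only [hkf, pvLoopA, hB, hmiss, pvLoopUnused, List.nil_append, hfilters]
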